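-- pv_equiv track=rewrite | github.com/qasmark/MLaTA | Practise/Viruses/dfs.py | find_steps_count
-- ===== SOURCE A (Python) =====
-- def find_steps_count(field, infected_cells_count):
--     steps_count = 0
--     while infected_cells_count < len(field) * len(field[0]):
--         steps_count += 1
--         for x in range(len(field)):
--             for y in range(len(field[0])):
--                 if field[x][y] == steps_count:
--                     if x > 0 and field[x-1][y] == 0:
--                         field[x-1][y] = steps_count + 1
--                         infected_cells_count += 1
--                     if x < len(field)-1 and field[x+1][y] == 0:
--                         field[x+1][y] = steps_count + 1
--                         infected_cells_count += 1
--                     if y > 0 and field[x][y-1] == 0: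
--                         field[x][y-1] = steps_count + 1
--                         infected_cells_count += 1
--                     if y < len(field[0])-1 and field[x][y+1] == 0:
--                         field[x][y+1] = steps_count + 1
--                         infected_cells_count += 1
--     return steps_count
-- ===== SOURCE B (Python) =====
-- # B: multi-source BFS. A rescans the whole grid once per step; B keeps a frontier
-- # of the cells infected on the previous step and expands only those, marking new
-- # cells in a boolean 'seen' grid, and returns the number of BFS layers.
-- # Return value only: A mutates `field` in place, B never mutates it.
-- def find_steps_count(field, infected_cells_count):
--     rows, cols = len(field), len(field[0])
--     if infected_cells_count >= rows * cols:
--         return 0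
--     seen = [[cell != 0 for cell in row] for row in field]
--     frontier = [(x, y) for x in range(rows) for y in range(cols) if field[x][y] != 0]
--     steps = 0
--     while True:
--         nxt = []
--         for x, y in frontier:
--             for nx, ny in ((x - 1, y), (x + 1, y), (x, y - 1), (x, y + 1)):
--                 if 0 <= nx < rows and 0 <= ny < cols and not seen[nx][ny]:
--                     seen[nx][ny] = True
--                     nxt.append((nx, ny))
--         if not nxt:
--             break
--         steps += 1
--         frontier = nxt
--     return steps
-- ===== Notes on version B (the rewrite author's own statement) =====
-- stated objective: alternative
-- what changed: A rescans the entire grid on every spreading step and pushes step numbers into the caller's grid; B runs a multi-source BFS, keeping only the frontier of newly infected cells and a boolean seen-grid, expanding each cell once and counting the layers (a timing run could not measure a ratio: A does not terminate on its random inputs).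
-- outside the precondition, e.g. on find_steps_count([[2, 0]], 1): A returns 2, B returns 1; on find_steps_count([[1], [0, 0]], 1): A returns 1, B returns 1
import Mathlib
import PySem

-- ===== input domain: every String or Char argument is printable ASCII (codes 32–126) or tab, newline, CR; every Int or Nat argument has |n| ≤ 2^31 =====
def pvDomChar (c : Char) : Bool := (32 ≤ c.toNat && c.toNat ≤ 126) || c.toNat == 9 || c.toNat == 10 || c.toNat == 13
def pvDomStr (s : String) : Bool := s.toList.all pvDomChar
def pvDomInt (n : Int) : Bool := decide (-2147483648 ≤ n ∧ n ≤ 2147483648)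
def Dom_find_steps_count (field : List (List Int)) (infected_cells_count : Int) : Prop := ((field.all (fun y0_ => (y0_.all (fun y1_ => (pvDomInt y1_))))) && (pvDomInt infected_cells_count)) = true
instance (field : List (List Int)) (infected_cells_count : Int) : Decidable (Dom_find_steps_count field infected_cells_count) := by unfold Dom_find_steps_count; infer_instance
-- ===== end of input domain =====

-- B replaces A's per-step rescan of the whole grid (push step numbers into the
-- caller's grid, in place) with a multi-source BFS: a boolean seen-grid plus a
-- frontier list of the cells infected on the previous step; only frontier cells
-- are expanded, and the returned value is the number of BFS layers.  A mutates
-- its `field` argument in place, B does not; the equivalence proved here is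
-- about the RETURN value only.

-- shared grid primitives (both Pythons read and write 2-d lists the same way)
def getC (g : List (List Int)) (x y : Nat) : Int := (g.getD x []).getD y 0

def setC (g : List (List Int)) (x y : Nat) (v : Int) : List (List Int) :=
  g.modify x (fun row => row.set y v)

-- row-major list of all coordinates (the nested `for x … for y …` loops)
def coords (n m : Nat) : List (Nat × Nat) :=
  (List.range n).flatMap (fun x => (List.range m).map (fun y => (x, y)))

-- ===== PORT A =====
-- one conditional write of A: `if <bound check> and field[tx][ty] == 0: field[tx][ty] = k+1; count += 1`
def write1 (b : Prop) [Decidable b] (tx ty : Nat) (k : Int) (s : List (List Int) × Int) :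
    List (List Int) × Int :=
  if b ∧ getC s.1 tx ty = 0 then (setC s.1 tx ty (k + 1), s.2 + 1) else s

-- one cell of A's sweep: if the cell carries the current step value k, A's four
-- if-blocks push k+1 into the up / down / left / right neighbour, in that order
def stepCell (n m : Nat) (k : Int) (s : List (List Int) × Int) (p : Nat × Nat) :
    List (List Int) × Int :=
  if getC s.1 p.1 p.2 = k then
    write1 (p.2 < m - 1) p.1 (p.2 + 1) k
      (write1 (0 < p.2) p.1 (p.2 - 1) k
        (write1 (p.1 < n - 1) (p.1 + 1) p.2 k
          (write1 (0 < p.1) (p.1 - 1) p.2 k s)))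
  else s

-- A's `while` loop (fuel only makes the recursion total; inside Pre_ it never runs out)
def loopA : Nat → List (List Int) → Int → Int → Int
  | 0, _, _, steps => steps
  | fuel + 1, g, cnt, steps =>
    if cnt < (g.length : Int) * ((g.headD []).length : Int) then
      let s := (coords g.length (g.headD []).length).foldl
        (stepCell g.length (g.headD []).length (steps + 1)) (g, cnt)
      loopA fuel s.1 s.2 (steps + 1)
    else steps

def find_steps_count (field : List (List Int)) (infected_cells_count : Int) : Int :=
  loopA (field.length * (field.headD []).length + 1) field infected_cells_count 0

-- ===== PORT B =====
-- seen[x][y] (out-of-range reads never happen: every visit condition bounds x and y)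
def seenAt (s : List (List Bool)) (x y : Nat) : Bool := (s.getD x []).getD y true

-- seen[x][y] = True
def markSeen (s : List (List Bool)) (x y : Nat) : List (List Bool) :=
  s.modify x (fun row => row.set y true)

-- one neighbour test of B: `if <in bounds> and not seen[x][y]: seen[x][y] = True; nxt.append((x, y))`
def visit (b : Prop) [Decidable b] (x y : Nat) (st : List (List Bool) × List (Nat × Nat)) :
    List (List Bool) × List (Nat × Nat) :=
  if b ∧ seenAt st.1 x y = false then (markSeen st.1 x y, st.2 ++ [(x, y)]) else st

-- B's inner `for nx, ny in ((x-1,y),(x+1,y),(x,y-1),(x,y+1))` loop for one frontier cell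
def expandCell (n m : Nat) (st : List (List Bool) × List (Nat × Nat)) (p : Nat × Nat) :
    List (List Bool) × List (Nat × Nat) :=
  visit (p.1 < n ∧ p.2 + 1 < m) p.1 (p.2 + 1)
    (visit (p.1 < n ∧ 0 < p.2) p.1 (p.2 - 1)
      (visit (p.1 + 1 < n ∧ p.2 < m) (p.1 + 1) p.2
        (visit (0 < p.1 ∧ p.1 - 1 < n ∧ p.2 < m) (p.1 - 1) p.2 st)))

-- B's `while True` loop; each iteration that continues marks at least one of the
-- n*m cells seen, so fuel n*m+1 is never exhausted (the Python always terminates)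
def loopB (n m : Nat) : Nat → List (List Bool) → List (Nat × Nat) → Int → Int
  | 0, _, _, steps => steps
  | fuel + 1, seen, frontier, steps =>
    let st := frontier.foldl (expandCell n m) (seen, ([] : List (Nat × Nat)))
    if st.2.isEmpty then steps else loopB n m fuel st.1 st.2 (steps + 1)

def find_steps_count_alt (field : List (List Int)) (infected_cells_count : Int) : Int :=
  if (field.length : Int) * ((field.headD []).length : Int) ≤ infected_cells_count then 0
  else
    loopB field.length (field.headD []).length
      (field.length * (field.headD []).length + 1)
      (field.map (fun row => row.map (fun c => c != 0)))
      ((coords field.length (field.headD []).length).filter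
        (fun p => getC field p.1 p.2 != 0)) 0

-- ===== PRECONDITION & SPEC =====
-- Pre_ restricts to the natural domain of the task: a nonempty rectangular 0/1 grid whose
-- infected count equals its number of 1-cells (with at least one), or a count already at
-- least the grid size (A then returns 0 at once).  On other value patterns A usually never
-- terminates; the few exotic preseeded patterns (values > 1) on which A does happen to
-- return are conservatively excluded, and so are ragged grids on which A happens to return.
def Pre_find_steps_count (field : List (List Int)) (infected_cells_count : Int) : Prop :=
  field ≠ [] ∧
    (((field.length : Int) * ((field.headD []).length : Int) ≤ infected_cells_count) ∨
     ((∀ row ∈ field, row.length = (field.headD []).length) ∧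
      (∀ row ∈ field, ∀ v ∈ row, v = 0 ∨ v = 1) ∧
      infected_cells_count = ((field.map (List.count 1)).sum : Int) ∧
      1 ≤ (field.map (List.count 1)).sum))

instance (field : List (List Int)) (infected_cells_count : Int) :
    Decidable (Pre_find_steps_count field infected_cells_count) := by
  unfold Pre_find_steps_count; infer_instance

def pvWitness_find_steps_count : List (List Int) × Int := ([[1, 0], [0, 0]], 1)

def Spec_find_steps_count (field : List (List Int)) (infected_cells_count : Int) (out : Int) : Prop := out = find_steps_count_alt field infected_cells_count
instance (field : List (List Int)) (infected_cells_count : Int) (out : Int) : Decidable (Spec_find_steps_count field infected_cells_count out) := by unfold Spec_find_steps_count; infer_instance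

-- ===== CLAIM (what is proved, stated in full; the proofs are below) =====
def Claim_equal_find_steps_count : Prop := ∀ (field : List (List Int)) (infected_cells_count : Int), Dom_find_steps_count field infected_cells_count → Pre_find_steps_count field infected_cells_count → Spec_find_steps_count field infected_cells_count (find_steps_count field infected_cells_count)

-- ===== LEMMAS AND PROOFS =====

-- rectangular shape: n rows, every row of length m
def Rect (g : List (List Int)) (n m : Nat) : Prop :=
  g.length = n ∧ ∀ i < n, (g.getD i []).length = m

def RectB (g : List (List Bool)) (n m : Nat) : Prop :=
  g.length = n ∧ ∀ i < n, (g.getD i []).length = m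

-- adjacency of two coordinates (subtraction-free)
def adjB (p t : Nat × Nat) : Bool :=
  (p.1 == t.1 + 1 && p.2 == t.2) || (t.1 == p.1 + 1 && p.2 == t.2) ||
  (p.2 == t.2 + 1 && p.1 == t.1) || (t.2 == p.2 + 1 && p.1 == t.1)

-- cells of the ORIGINAL grid g that are 0 and adjacent to a processed source of value k
def predT (g : List (List Int)) (k : Int) (P : List (Nat × Nat)) (t : Nat × Nat) : Bool :=
  (getC g t.1 t.2 == 0) && P.any (fun p => (getC g p.1 p.2 == k) && adjB p t)

def tgts (g : List (List Int)) (k : Int) (n m : Nat) (P : List (Nat × Nat)) : List (Nat × Nat) :=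
  (coords n m).filter (predT g k P)

-- `for x, y in T: grid[x][y] = k + 1`
def markCells (g : List (List Int)) (k : Int) (L : List (Nat × Nat)) : List (List Int) :=
  L.foldl (fun h p => setC h p.1 p.2 (k + 1)) g

-- Manhattan distance and distance to the nearest source (the spreading front's law)
def manh (p q : Nat × Nat) : Int :=
  ((p.1 - q.1 : Nat) : Int) + ((q.1 - p.1 : Nat) : Int) +
  ((p.2 - q.2 : Nat) : Int) + ((q.2 - p.2 : Nat) : Int)

def mdist (S : List (Nat × Nat)) (p : Nat × Nat) : Int :=
  match S with
  | [] => 0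
  | s :: t => t.foldl (fun a q => min a (manh p q)) (manh p s)

def Dmax (S : List (Nat × Nat)) (n m : Nat) : Int :=
  ((coords n m).map (mdist S)).foldl max 0

-- ---- coords ----
lemma coords_succ (n m : Nat) :
    coords (n + 1) m = coords n m ++ (List.range m).map (fun y => (n, y)) := by
  simp [coords, List.range_succ]

lemma mem_coords {n m : Nat} {p : Nat × Nat} : p ∈ coords n m ↔ p.1 < n ∧ p.2 < m := by
  cases p with
  | mk a b =>
    simp only [coords, List.mem_flatMap, List.mem_map, List.mem_range, Prod.mk.injEq]
    constructor
    · rintro ⟨x, hx, y, hy, rfl, rfl⟩; exact ⟨hx, hy⟩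
    · rintro ⟨ha, hb⟩; exact ⟨a, ha, b, hb, rfl, rfl⟩

lemma nodup_coords (n m : Nat) : (coords n m).Nodup := by
  induction n with
  | zero => simp [coords]
  | succ n ih =>
    rw [coords_succ, List.nodup_append]
    refine ⟨ih, List.Nodup.map (fun a b h => by simpa using h) (List.nodup_range), ?_⟩
    intro a ha b hb
    have h1 : a.1 < n := (mem_coords.1 ha).1
    have h2 : b.1 = n := by
      rcases List.mem_map.1 hb with ⟨y, -, rfl⟩; rfl
    intro h; rw [h] at h1; omega

lemma length_coords (n m : Nat) : (coords n m).length = n * m := by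
  induction n with
  | zero => simp [coords]
  | succ n ih => rw [coords_succ]; simp [ih, Nat.succ_mul]


-- ---- grid write machinery (shared style for Int and Bool grids) ----
lemma getElem?_modify_eq {α : Type} (g : List α) (x x' : Nat) (f : α → α) :
    (g.modify x f)[x']? = if x = x' then (g[x']?.map f) else g[x']? := by
  rw [List.getElem?_modify]
  cases g[x']? <;> split <;> simp_all

lemma getC_setC (g : List (List Int)) (x y : Nat) (v : Int) (x' y' : Nat) :
    getC (setC g x y v) x' y' =
      if x = x' ∧ y = y' ∧ y < (g.getD x' []).length then v else getC g x' y' := by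
  unfold getC setC
  simp only [List.getD_eq_getElem?_getD]
  rw [getElem?_modify_eq]
  by_cases hx : x = x'
  · subst hx
    cases hrow : g[x]? with
    | none => simp
    | some r =>
      simp only [ite_true, true_and, Option.map_some, Option.getD_some]
      rw [List.getElem?_set]
      by_cases hy : y = y'
      · subst hy
        by_cases hlt : y < r.length
        · simp [hlt]
        · rw [if_pos rfl, if_neg hlt, List.getElem?_eq_none (by omega)]
          simp [hlt]
      · simp [hy]
  · simp [hx]

lemma length_setC (g : List (List Int)) (x y : Nat) (v : Int) :
    (setC g x y v).length = g.length := by simp [setC]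

lemma rowLen_setC (g : List (List Int)) (x y : Nat) (v : Int) (i : Nat) :
    ((setC g x y v).getD i []).length = (g.getD i []).length := by
  unfold setC
  rw [List.getD_eq_getElem?_getD, List.getD_eq_getElem?_getD (l := g), getElem?_modify_eq]
  cases hrow : g[i]? <;> split <;> simp_all

lemma setC_rect {g : List (List Int)} {n m : Nat} (h : Rect g n m) (x y : Nat) (v : Int) :
    Rect (setC g x y v) n m :=
  ⟨by rw [length_setC, h.1], fun i hi => by rw [rowLen_setC]; exact h.2 i hi⟩

lemma markCells_rect {n m : Nat} (k : Int) :
    ∀ (L : List (Nat × Nat)) (g : List (List Int)), Rect g n m → Rect (markCells g k L) n m := by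
  intro L
  induction L with
  | nil => intro g h; exact h
  | cons a L ih =>
    intro g h
    exact ih (setC g a.1 a.2 (k + 1)) (setC_rect h a.1 a.2 (k + 1))

lemma getC_markCells {n m : Nat} (k : Int) :
    ∀ (L : List (Nat × Nat)) (g : List (List Int)), Rect g n m →
      (∀ a ∈ L, a.1 < n ∧ a.2 < m) → ∀ q : Nat × Nat,
      getC (markCells g k L) q.1 q.2 = if q ∈ L then k + 1 else getC g q.1 q.2 := by
  intro L
  induction L with
  | nil => intro g _ _ q; simp [markCells]
  | cons a L ih =>
    intro g hrect hL q
    have hrect' := setC_rect hrect a.1 a.2 (k + 1)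
    have ih' := ih (setC g a.1 a.2 (k + 1)) hrect' (fun b hb => hL b (by simp [hb])) q
    show getC (markCells (setC g a.1 a.2 (k + 1)) k L) q.1 q.2 = _
    rw [ih']
    by_cases hqL : q ∈ L
    · simp [hqL]
    · rw [if_neg hqL, getC_setC]
      by_cases hqa : q = a
      · subst hqa
        have h1 : q.1 < n := (hL q (by simp)).1
        have h2 : q.2 < (g.getD q.1 []).length := by
          rw [hrect.2 q.1 h1]; exact (hL q (by simp)).2
        rw [if_pos ⟨rfl, rfl, h2⟩, if_pos (by simp)]
      · have hno : ¬(a.1 = q.1 ∧ a.2 = q.2 ∧ a.2 < (g.getD q.1 []).length) := by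
          rintro ⟨h1, h2, _⟩
          exact hqa (by cases q; cases a; simp_all)
        rw [if_neg hno, if_neg (by simp [hqa, hqL])]

lemma mem_ite_singleton {c : Prop} [Decidable c] {t a : Nat × Nat} :
    a ∈ (if c then [t] else ([] : List (Nat × Nat))) ↔ c ∧ a = t := by
  split <;> simp_all

-- one conditional write of A, rephrased on the original grid
lemma mark_step {g : List (List Int)} {n m : Nat} {k : Int} (hrect : Rect g n m)
    (hk : 1 ≤ k) (L : List (Nat × Nat)) (hL : ∀ a ∈ L, a.1 < n ∧ a.2 < m)
    (b : Prop) [Decidable b] (tx ty : Nat) (c : Int) :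
    write1 b tx ty k (markCells g k L, c) =
    (markCells g k (L ++ if b ∧ getC g tx ty = 0 ∧ (tx, ty) ∉ L then [(tx, ty)] else []),
      c + if b ∧ getC g tx ty = 0 ∧ (tx, ty) ∉ L then 1 else 0) := by
  have hget := getC_markCells k L g hrect hL (tx, ty)
  have hcond : (b ∧ getC (markCells g k L) tx ty = 0) ↔
      (b ∧ getC g tx ty = 0 ∧ (tx, ty) ∉ L) := by
    constructor
    · rintro ⟨hb, h0⟩
      by_cases htL : (tx, ty) ∈ L
      · rw [show getC (markCells g k L) tx ty = k + 1 by simpa [htL] using hget] at h0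
        omega
      · rw [show getC (markCells g k L) tx ty = getC g tx ty by simpa [htL] using hget] at h0
        exact ⟨hb, h0, htL⟩
    · rintro ⟨hb, h0, htL⟩
      refine ⟨hb, ?_⟩
      rw [show getC (markCells g k L) tx ty = getC g tx ty by simpa [htL] using hget]
      exact h0
  unfold write1
  by_cases hC : b ∧ getC g tx ty = 0 ∧ (tx, ty) ∉ L
  · rw [if_pos (hcond.2 hC), if_pos hC, if_pos hC]
    refine Prod.ext ?_ rfl
    simp [markCells, List.foldl_append]
  · rw [if_neg (fun h => hC (hcond.1 h)), if_neg hC, if_neg hC]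
    simp

lemma adjB_iff (p t : Nat × Nat) : adjB p t = true ↔
    (p.1 = t.1 + 1 ∧ p.2 = t.2) ∨ (t.1 = p.1 + 1 ∧ p.2 = t.2) ∨
    (p.2 = t.2 + 1 ∧ p.1 = t.1) ∨ (t.2 = p.2 + 1 ∧ p.1 = t.1) := by
  simp only [adjB, Bool.or_eq_true, Bool.and_eq_true, beq_iff_eq]
  tauto

lemma set_set_comm (l : List Int) (y y' : Nat) (v : Int) :
    (l.set y v).set y' v = (l.set y' v).set y v := by
  by_cases h : y = y'
  · subst h; rfl
  · apply List.ext_getElem?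
    intro i
    simp only [List.getElem?_set, List.length_set]
    by_cases h1 : y = i <;> by_cases h2 : y' = i <;> simp_all

lemma setC_comm (g : List (List Int)) (x y x' y' : Nat) (v : Int) :
    setC (setC g x y v) x' y' v = setC (setC g x' y' v) x y v := by
  apply List.ext_getElem?
  intro i
  simp only [setC, getElem?_modify_eq]
  by_cases h1 : x = i <;> by_cases h2 : x' = i <;>
    cases hrow : g[i]? <;> simp [h1, h2, set_set_comm]

lemma markCells_perm {g : List (List Int)} {k : Int} {L L' : List (Nat × Nat)}
    (h : L.Perm L') : markCells g k L = markCells g k L' := by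
  unfold markCells
  exact @List.Perm.foldl_eq _ _ _ _ _ ⟨fun b a1 a2 => setC_comm _ _ _ _ _ _⟩ h g

lemma mem_tgts {g : List (List Int)} {k : Int} {n m : Nat} {P : List (Nat × Nat)}
    {t : Nat × Nat} : t ∈ tgts g k n m P ↔
      (t.1 < n ∧ t.2 < m) ∧ getC g t.1 t.2 = 0 ∧
        ∃ p ∈ P, getC g p.1 p.2 = k ∧ adjB p t = true := by
  simp [tgts, List.mem_filter, mem_coords, predT, List.any_eq_true, and_assoc]

lemma tgts_sub {g : List (List Int)} {k : Int} {n m : Nat} {P : List (Nat × Nat)} :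
    ∀ a ∈ tgts g k n m P, a.1 < n ∧ a.2 < m :=
  fun a ha => mem_coords.1 (List.mem_filter.1 ha).1

lemma tgts_nodup (g : List (List Int)) (k : Int) (n m : Nat) (P : List (Nat × Nat)) :
    (tgts g k n m P).Nodup :=
  (nodup_coords n m).filter _

lemma nodup_append_ite {L : List (Nat × Nat)} (hL : L.Nodup) (c : Prop) [Decidable c]
    (t : Nat × Nat) (hc : c → t ∉ L) : (L ++ if c then [t] else []).Nodup := by
  by_cases h : c
  · rw [if_pos h, List.nodup_append]
    refine ⟨hL, List.nodup_singleton t, ?_⟩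
    intro a ha b hb
    have hb' : b = t := by simpa using hb
    subst hb'
    exact fun heq => hc h (heq ▸ ha)
  · simp [h, hL]

lemma stepCell_eq {g : List (List Int)} {n m : Nat} {k : Int} {c : Int}
    (hrect : Rect g n m) (hk : 1 ≤ k) (P : List (Nat × Nat)) (p : Nat × Nat)
    (hp1 : p.1 < n) (hp2 : p.2 < m) :
    stepCell n m k (markCells g k (tgts g k n m P), c + ((tgts g k n m P).length : Int)) p =
      (markCells g k (tgts g k n m (P ++ [p])),
        c + ((tgts g k n m (P ++ [p])).length : Int)) := by
  have hTsub : ∀ a ∈ tgts g k n m P, a.1 < n ∧ a.2 < m := tgts_sub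
  have hget := getC_markCells k (tgts g k n m P) g hrect hTsub
  simp only [stepCell]
  by_cases hgp : getC g p.1 p.2 = k
  · -- the cell really carries value k: A pushes into the four neighbours
    have hpT : p ∉ tgts g k n m P := by
      intro hmem
      have h0 := (mem_tgts.1 hmem).2.1
      omega
    have hmark : getC (markCells g k (tgts g k n m P)) p.1 p.2 = k := by
      rw [hget p, if_neg hpT]; exact hgp
    rw [if_pos hmark]
    rw [mark_step hrect hk _ hTsub (0 < p.1) (p.1 - 1) p.2]
    set C1 : Prop := 0 < p.1 ∧ getC g (p.1 - 1) p.2 = 0 ∧ (p.1 - 1, p.2) ∉ tgts g k n m P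
      with hC1def
    set L1 : List (Nat × Nat) := tgts g k n m P ++ if C1 then [(p.1 - 1, p.2)] else []
      with hL1def
    have hL1sub : ∀ a ∈ L1, a.1 < n ∧ a.2 < m := by
      intro a ha
      rcases List.mem_append.1 ha with h | h
      · exact hTsub a h
      · rw [mem_ite_singleton] at h
        obtain ⟨⟨hb, -⟩, rfl⟩ := h
        exact ⟨by omega, hp2⟩
    rw [mark_step hrect hk _ hL1sub (p.1 < n - 1) (p.1 + 1) p.2]
    set C2 : Prop := p.1 < n - 1 ∧ getC g (p.1 + 1) p.2 = 0 ∧ (p.1 + 1, p.2) ∉ L1 with hC2def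
    set L2 : List (Nat × Nat) := L1 ++ if C2 then [(p.1 + 1, p.2)] else [] with hL2def
    have hL2sub : ∀ a ∈ L2, a.1 < n ∧ a.2 < m := by
      intro a ha
      rcases List.mem_append.1 ha with h | h
      · exact hL1sub a h
      · rw [mem_ite_singleton] at h
        obtain ⟨⟨hb, -⟩, rfl⟩ := h
        exact ⟨by omega, hp2⟩
    rw [mark_step hrect hk _ hL2sub (0 < p.2) p.1 (p.2 - 1)]
    set C3 : Prop := 0 < p.2 ∧ getC g p.1 (p.2 - 1) = 0 ∧ (p.1, p.2 - 1) ∉ L2 with hC3def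
    set L3 : List (Nat × Nat) := L2 ++ if C3 then [(p.1, p.2 - 1)] else [] with hL3def
    have hL3sub : ∀ a ∈ L3, a.1 < n ∧ a.2 < m := by
      intro a ha
      rcases List.mem_append.1 ha with h | h
      · exact hL2sub a h
      · rw [mem_ite_singleton] at h
        obtain ⟨⟨hb, -⟩, rfl⟩ := h
        exact ⟨hp1, by omega⟩
    rw [mark_step hrect hk _ hL3sub (p.2 < m - 1) p.1 (p.2 + 1)]
    set C4 : Prop := p.2 < m - 1 ∧ getC g p.1 (p.2 + 1) = 0 ∧ (p.1, p.2 + 1) ∉ L3 with hC4def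
    set L4 : List (Nat × Nat) := L3 ++ if C4 then [(p.1, p.2 + 1)] else [] with hL4def
    -- membership characterisations of the accumulated write lists
    have hmem1 : ∀ a : Nat × Nat, a ∈ L1 ↔ a ∈ tgts g k n m P ∨ (C1 ∧ a = (p.1 - 1, p.2)) := by
      intro a; rw [hL1def]
      simp only [List.mem_append, mem_ite_singleton]
    have hmem2 : ∀ a : Nat × Nat, a ∈ L2 ↔
        a ∈ tgts g k n m P ∨ (C1 ∧ a = (p.1 - 1, p.2)) ∨ (C2 ∧ a = (p.1 + 1, p.2)) := by
      intro a; rw [hL2def]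
      simp only [List.mem_append, mem_ite_singleton, hmem1 a, or_assoc]
    have hmem3 : ∀ a : Nat × Nat, a ∈ L3 ↔
        a ∈ tgts g k n m P ∨ (C1 ∧ a = (p.1 - 1, p.2)) ∨ (C2 ∧ a = (p.1 + 1, p.2)) ∨
          (C3 ∧ a = (p.1, p.2 - 1)) := by
      intro a; rw [hL3def]
      simp only [List.mem_append, mem_ite_singleton, hmem2 a, or_assoc]
    have hmem4 : ∀ a : Nat × Nat, a ∈ L4 ↔
        a ∈ tgts g k n m P ∨ (C1 ∧ a = (p.1 - 1, p.2)) ∨ (C2 ∧ a = (p.1 + 1, p.2)) ∨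
          (C3 ∧ a = (p.1, p.2 - 1)) ∨ (C4 ∧ a = (p.1, p.2 + 1)) := by
      intro a; rw [hL4def]
      simp only [List.mem_append, mem_ite_singleton, hmem3 a, or_assoc]
    -- the accumulated list has no duplicates
    have hnod1 : L1.Nodup := by
      rw [hL1def]
      exact nodup_append_ite (tgts_nodup g k n m P) _ _ (fun h => by rw [hC1def] at h; exact h.2.2)
    have hnod2 : L2.Nodup := by
      rw [hL2def]
      exact nodup_append_ite hnod1 _ _ (fun h => by rw [hC2def] at h; exact h.2.2)
    have hnod3 : L3.Nodup := by
      rw [hL3def]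
      exact nodup_append_ite hnod2 _ _ (fun h => by rw [hC3def] at h; exact h.2.2)
    have hnd4 : L4.Nodup := by
      rw [hL4def]
      exact nodup_append_ite hnod3 _ _ (fun h => by rw [hC4def] at h; exact h.2.2)
    -- membership characterisation of the new target set
    have hmemT' : ∀ a : Nat × Nat, a ∈ tgts g k n m (P ++ [p]) ↔
        a ∈ tgts g k n m P ∨ ((a.1 < n ∧ a.2 < m) ∧ getC g a.1 a.2 = 0 ∧ adjB p a = true) := by
      intro a
      rw [mem_tgts]
      constructor
      · rintro ⟨hb, h0, q, hq, hqk, hadj⟩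
        rcases List.mem_append.1 hq with hq | hq
        · exact Or.inl (mem_tgts.2 ⟨hb, h0, q, hq, hqk, hadj⟩)
        · simp only [List.mem_singleton] at hq; subst hq
          exact Or.inr ⟨hb, h0, hadj⟩
      · rintro (hA | ⟨hb, h0, hadj⟩)
        · obtain ⟨hb, h0, q, hq, hqk, hadj⟩ := mem_tgts.1 hA
          exact ⟨hb, h0, q, List.mem_append_left _ hq, hqk, hadj⟩
        · exact ⟨hb, h0, p, List.mem_append_right _ (by simp), hgp, hadj⟩
    -- the two lists are permutations of each other
    have hiff : ∀ a : Nat × Nat, a ∈ tgts g k n m (P ++ [p]) ↔ a ∈ L4 := by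
      rintro ⟨u, v⟩
      rw [hmemT' (u, v), hmem4 (u, v)]
      constructor
      · rintro (h | ⟨⟨hbu, hbv⟩, h0, hadj⟩)
        · exact Or.inl h
        rcases (adjB_iff p (u, v)).1 hadj with ⟨h1, h2⟩ | ⟨h1, h2⟩ | ⟨h1, h2⟩ | ⟨h1, h2⟩
        · -- a = (p.1 - 1, p.2)
          have ha1 : u = p.1 - 1 := by omega
          have ha2 : v = p.2 := by omega
          subst ha1; subst ha2
          by_cases hIn : (p.1 - 1, p.2) ∈ tgts g k n m P
          · exact Or.inl hIn
          · exact Or.inr (Or.inl ⟨⟨by omega, h0, hIn⟩, rfl⟩)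
        · -- a = (p.1 + 1, p.2)
          have ha1 : u = p.1 + 1 := by omega
          have ha2 : v = p.2 := by omega
          subst ha1; subst ha2
          by_cases hIn : (p.1 + 1, p.2) ∈ L1
          · rcases (hmem1 _).1 hIn with h | ⟨-, heq⟩
            · exact Or.inl h
            · exfalso
              simp only [Prod.mk.injEq] at heq
              omega
          · exact Or.inr (Or.inr (Or.inl ⟨⟨by omega, h0, hIn⟩, rfl⟩))
        · -- a = (p.1, p.2 - 1)
          have ha1 : u = p.1 := by omega
          have ha2 : v = p.2 - 1 := by omega
          subst ha1; subst ha2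
          by_cases hIn : (p.1, p.2 - 1) ∈ L2
          · rcases (hmem2 _).1 hIn with h | ⟨⟨hb1, -⟩, heq⟩ | ⟨-, heq⟩
            · exact Or.inl h
            · exfalso; simp only [Prod.mk.injEq] at heq; omega
            · exfalso; simp only [Prod.mk.injEq] at heq; omega
          · exact Or.inr (Or.inr (Or.inr (Or.inl ⟨⟨by omega, h0, hIn⟩, rfl⟩)))
        · -- a = (p.1, p.2 + 1)
          have ha1 : u = p.1 := by omega
          have ha2 : v = p.2 + 1 := by omega
          subst ha1; subst ha2
          by_cases hIn : (p.1, p.2 + 1) ∈ L3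
          · rcases (hmem3 _).1 hIn with h | ⟨⟨hb1, -⟩, heq⟩ | ⟨-, heq⟩ | ⟨-, heq⟩
            · exact Or.inl h
            · exfalso; simp only [Prod.mk.injEq] at heq; omega
            · exfalso; simp only [Prod.mk.injEq] at heq; omega
            · exfalso; simp only [Prod.mk.injEq] at heq; omega
          · exact Or.inr (Or.inr (Or.inr (Or.inr ⟨⟨by omega, h0, hIn⟩, rfl⟩)))
      · intro h
        rcases h with h | ⟨hc', heq⟩ | ⟨hc', heq⟩ | ⟨hc', heq⟩ | ⟨hc', heq⟩
        · exact Or.inl h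
        · rw [hC1def] at hc'
          obtain ⟨hb, h0, -⟩ := hc'
          simp only [Prod.mk.injEq] at heq
          obtain ⟨he1, he2⟩ := heq
          subst he1; subst he2
          refine Or.inr ⟨⟨by omega, by omega⟩, h0, ?_⟩
          rw [adjB_iff]; omega
        · rw [hC2def] at hc'
          obtain ⟨hb, h0, -⟩ := hc'
          simp only [Prod.mk.injEq] at heq
          obtain ⟨he1, he2⟩ := heq
          subst he1; subst he2
          refine Or.inr ⟨⟨by omega, by omega⟩, h0, ?_⟩
          rw [adjB_iff]; omega
        · rw [hC3def] at hc'
          obtain ⟨hb, h0, -⟩ := hc'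
          simp only [Prod.mk.injEq] at heq
          obtain ⟨he1, he2⟩ := heq
          subst he1; subst he2
          refine Or.inr ⟨⟨by omega, by omega⟩, h0, ?_⟩
          rw [adjB_iff]; omega
        · rw [hC4def] at hc'
          obtain ⟨hb, h0, -⟩ := hc'
          simp only [Prod.mk.injEq] at heq
          obtain ⟨he1, he2⟩ := heq
          subst he1; subst he2
          refine Or.inr ⟨⟨by omega, by omega⟩, h0, ?_⟩
          rw [adjB_iff]; omega
    have hperm : (tgts g k n m (P ++ [p])).Perm L4 :=
      (List.perm_ext_iff_of_nodup (tgts_nodup g k n m (P ++ [p])) hnd4).2 hiff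
    -- conclude: same grid (writes commute) and same count (same number of new cells)
    have hlen : ((tgts g k n m (P ++ [p])).length : Int) =
        ((tgts g k n m P).length : Int) + (if C1 then 1 else 0) + (if C2 then 1 else 0) +
          (if C3 then 1 else 0) + (if C4 then 1 else 0) := by
      rw [hperm.length_eq, hL4def]
      by_cases h4 : C4 <;> by_cases h3 : C3 <;> by_cases h2 : C2 <;> by_cases h1 : C1 <;>
        simp [h1, h2, h3, h4, hL3def, hL2def, hL1def, List.length_append] <;>
        push_cast <;> ring
    rw [markCells_perm hperm, hlen]
    simp only [Prod.mk.injEq]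
    constructor
    · trivial
    · ring
  · -- the cell does not carry value k: nothing happens and the target set is unchanged
    have hmark : getC (markCells g k (tgts g k n m P)) p.1 p.2 ≠ k := by
      rw [hget p]
      split
      · omega
      · exact hgp
    rw [if_neg hmark]
    have hfalse : (getC g p.1 p.2 == k) = false := by simp [hgp]
    have hTT : tgts g k n m (P ++ [p]) = tgts g k n m P := by
      unfold tgts
      apply List.filter_congr
      intro t _
      simp [predT, List.any_append, hfalse]
    rw [hTT]

lemma sweep_go {g : List (List Int)} {n m : Nat} {k : Int} {c : Int}
    (hrect : Rect g n m) (hk : 1 ≤ k) :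
    ∀ (L P : List (Nat × Nat)), (∀ q ∈ L, q.1 < n ∧ q.2 < m) →
      L.foldl (stepCell n m k) (markCells g k (tgts g k n m P), c + ((tgts g k n m P).length : Int)) =
        (markCells g k (tgts g k n m (P ++ L)), c + ((tgts g k n m (P ++ L)).length : Int)) := by
  intro L
  induction L with
  | nil => intro P _; simp
  | cons p L ih =>
    intro P hq
    have h1 := stepCell_eq (c := c) hrect hk P p (hq p (by simp)).1 (hq p (by simp)).2
    simp only [List.foldl_cons, h1]
    have h2 := ih (P ++ [p]) (fun q hqq => hq q (by simp [hqq]))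
    simpa using h2

lemma sweep_eq {g : List (List Int)} {n m : Nat} {k : Int} {c : Int}
    (hrect : Rect g n m) (hk : 1 ≤ k) :
    (coords n m).foldl (stepCell n m k) (g, c) =
      (markCells g k (tgts g k n m (coords n m)),
        c + ((tgts g k n m (coords n m)).length : Int)) := by
  have h0 : tgts g k n m [] = [] := by simp [tgts, predT]
  have h := sweep_go (c := c) hrect hk (coords n m) [] (fun q hq => mem_coords.1 hq)
  rw [h0] at h
  simp only [markCells, List.foldl_nil, List.length_nil, Nat.cast_zero, add_zero,
    List.nil_append] at h
  exact h

lemma headD_getD (g : List (List Int)) : g.headD [] = g.getD 0 [] := by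
  cases g <;> simp


-- ---- Manhattan-distance theory ----
lemma manh_nonneg (p q : Nat × Nat) : 0 ≤ manh p q := by
  unfold manh; omega

lemma manh_self (p : Nat × Nat) : manh p p = 0 := by simp [manh]

lemma manh_eq_zero {p q : Nat × Nat} (h : manh p q = 0) : p = q := by
  obtain ⟨a, b⟩ := p; obtain ⟨c, d⟩ := q
  simp only [manh] at h
  simp only [Prod.mk.injEq]
  omega

lemma foldl_min_le_init (p : Nat × Nat) :
    ∀ (t : List (Nat × Nat)) (a : Int), t.foldl (fun a q => min a (manh p q)) a ≤ a := by
  intro t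
  induction t with
  | nil => intro a; simp
  | cons s t ih =>
    intro a
    calc (s :: t).foldl (fun a q => min a (manh p q)) a
        ≤ min a (manh p s) := ih _
      _ ≤ a := min_le_left _ _

lemma foldl_min_le_mem (p : Nat × Nat) {q : Nat × Nat} :
    ∀ (t : List (Nat × Nat)) (a : Int), q ∈ t →
      t.foldl (fun a r => min a (manh p r)) a ≤ manh p q := by
  intro t
  induction t with
  | nil => intro a h; simp at h
  | cons s t ih =>
    intro a h
    rcases List.mem_cons.1 h with rfl | h
    · calc (q :: t).foldl (fun a r => min a (manh p r)) a
          ≤ min a (manh p q) := foldl_min_le_init p t _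
        _ ≤ manh p q := min_le_right _ _
    · exact ih _ h

lemma foldl_min_cases (p : Nat × Nat) :
    ∀ (t : List (Nat × Nat)) (a : Int),
      t.foldl (fun a r => min a (manh p r)) a = a ∨
        ∃ q ∈ t, t.foldl (fun a r => min a (manh p r)) a = manh p q := by
  intro t
  induction t with
  | nil => intro a; simp
  | cons s t ih =>
    intro a
    rcases ih (min a (manh p s)) with h | ⟨q, hq, h⟩
    · rcases le_or_gt a (manh p s) with hle | hlt
      · left; rw [List.foldl_cons, h]; omega
      · right; exact ⟨s, by simp, by rw [List.foldl_cons, h]; omega⟩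
    · right; exact ⟨q, by simp [hq], by rw [List.foldl_cons]; exact h⟩

lemma mdist_le {S : List (Nat × Nat)} {q : Nat × Nat} (p : Nat × Nat) (h : q ∈ S) :
    mdist S p ≤ manh p q := by
  cases S with
  | nil => simp at h
  | cons s t =>
    rcases List.mem_cons.1 h with rfl | h
    · exact foldl_min_le_init p t _
    · exact foldl_min_le_mem p t _ h

lemma mdist_attained {S : List (Nat × Nat)} (hS : S ≠ []) (p : Nat × Nat) :
    ∃ q ∈ S, mdist S p = manh p q := by
  cases S with
  | nil => exact absurd rfl hS
  | cons s t =>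
    rcases foldl_min_cases p t (manh p s) with h | ⟨q, hq, h⟩
    · exact ⟨s, by simp, h⟩
    · exact ⟨q, by simp [hq], h⟩

lemma mdist_nonneg {S : List (Nat × Nat)} (hS : S ≠ []) (p : Nat × Nat) :
    0 ≤ mdist S p := by
  obtain ⟨q, -, h⟩ := mdist_attained hS p
  rw [h]; exact manh_nonneg p q

lemma mdist_zero_iff {S : List (Nat × Nat)} (hS : S ≠ []) (p : Nat × Nat) :
    mdist S p = 0 ↔ p ∈ S := by
  constructor
  · intro h
    obtain ⟨q, hq, hh⟩ := mdist_attained hS p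
    rw [hh] at h
    rw [manh_eq_zero h]; exact hq
  · intro h
    have h1 := mdist_le p h
    rw [manh_self] at h1
    have h2 := mdist_nonneg hS p
    omega

lemma manh_adj {q p : Nat × Nat} (h : adjB q p = true) (s : Nat × Nat) :
    manh p s ≤ manh q s + 1 := by
  rcases (adjB_iff q p).1 h with ⟨h1, h2⟩ | ⟨h1, h2⟩ | ⟨h1, h2⟩ | ⟨h1, h2⟩ <;>
    · simp only [manh]; omega

lemma mdist_lip {S : List (Nat × Nat)} (hS : S ≠ []) {q p : Nat × Nat}
    (h : adjB q p = true) : mdist S p ≤ mdist S q + 1 := by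
  obtain ⟨s, hs, hh⟩ := mdist_attained hS q
  calc mdist S p ≤ manh p s := mdist_le p hs
    _ ≤ manh q s + 1 := manh_adj h s
    _ = mdist S q + 1 := by rw [hh]

lemma mdist_descent {S : List (Nat × Nat)} {n m : Nat} (hS : S ≠ [])
    (hSin : ∀ s ∈ S, s.1 < n ∧ s.2 < m) {p : Nat × Nat} (hp1 : p.1 < n) (hp2 : p.2 < m)
    {d : Int} (hd : 0 ≤ d) (h : mdist S p = d + 1) :
    ∃ q : Nat × Nat, q.1 < n ∧ q.2 < m ∧ adjB q p = true ∧ mdist S q = d := by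
  obtain ⟨s, hs, hh⟩ := mdist_attained hS p
  obtain ⟨hs1, hs2⟩ := hSin s hs
  rw [h] at hh
  have key : ∃ q : Nat × Nat, q.1 < n ∧ q.2 < m ∧ adjB q p = true ∧ manh q s = d := by
    rcases Nat.lt_trichotomy p.1 s.1 with hx | hx | hx
    · refine ⟨(p.1 + 1, p.2), by omega, hp2, ?_, ?_⟩
      · rw [adjB_iff]; left; exact ⟨rfl, rfl⟩
      · simp only [manh] at hh ⊢; omega
    · rcases Nat.lt_trichotomy p.2 s.2 with hy | hy | hy
      · refine ⟨(p.1, p.2 + 1), hp1, by omega, ?_, ?_⟩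
        · rw [adjB_iff]; right; right; left; exact ⟨rfl, rfl⟩
        · simp only [manh] at hh ⊢; omega
      · exfalso; simp only [manh] at hh; omega
      · refine ⟨(p.1, p.2 - 1), hp1, by omega, ?_, ?_⟩
        · rw [adjB_iff]; right; right; right; exact ⟨by omega, rfl⟩
        · simp only [manh] at hh ⊢; omega
    · refine ⟨(p.1 - 1, p.2), by omega, hp2, ?_, ?_⟩
      · rw [adjB_iff]; right; left; exact ⟨by omega, rfl⟩
      · simp only [manh] at hh ⊢; omega
  obtain ⟨q, hq1, hq2, hadj, hqs⟩ := key
  refine ⟨q, hq1, hq2, hadj, ?_⟩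
  have h1 : mdist S q ≤ d := by
    calc mdist S q ≤ manh q s := mdist_le q hs
      _ = d := hqs
  have h2 := mdist_lip hS hadj
  omega

-- every intermediate distance value is attained somewhere on the grid
lemma mdist_exists_eq {S : List (Nat × Nat)} {n m : Nat} (hS : S ≠ [])
    (hSin : ∀ s ∈ S, s.1 < n ∧ s.2 < m) :
    ∀ (j : Nat) (p : Nat × Nat), p.1 < n → p.2 < m → ∀ (d : Int), 0 ≤ d →
      d ≤ mdist S p → (mdist S p - d).toNat = j →
      ∃ q : Nat × Nat, q.1 < n ∧ q.2 < m ∧ mdist S q = d := by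
  intro j
  induction j with
  | zero =>
    intro p hp1 hp2 d hd hle hj
    exact ⟨p, hp1, hp2, by omega⟩
  | succ j ih =>
    intro p hp1 hp2 d hd hle hj
    have h1 : mdist S p = (mdist S p - 1) + 1 := by omega
    have h0 : 0 ≤ mdist S p - 1 := by omega
    obtain ⟨q, hq1, hq2, -, hq⟩ := mdist_descent hS hSin hp1 hp2 h0 h1
    exact ih q hq1 hq2 d hd (by omega) (by omega)

-- ---- Dmax : the largest distance on the grid ----
lemma le_foldl_max_init : ∀ (l : List Int) (a : Int), a ≤ l.foldl max a := by
  intro l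
  induction l with
  | nil => intro a; simp
  | cons s t ih =>
    intro a
    calc a ≤ max a s := le_max_left _ _
      _ ≤ (s :: t).foldl max a := ih _

lemma foldl_max_le_mem {x : Int} : ∀ (l : List Int) (a : Int), x ∈ l → x ≤ l.foldl max a := by
  intro l
  induction l with
  | nil => intro a h; simp at h
  | cons s t ih =>
    intro a h
    rcases List.mem_cons.1 h with rfl | h
    · calc x ≤ max a x := le_max_right _ _
        _ ≤ (x :: t).foldl max a := by
          rw [List.foldl_cons]
          exact le_foldl_max_init t _
    · exact ih _ h

lemma foldl_max_cases : ∀ (l : List Int) (a : Int), l.foldl max a = a ∨ l.foldl max a ∈ l := by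
  intro l
  induction l with
  | nil => intro a; simp
  | cons s t ih =>
    intro a
    rcases ih (max a s) with h | h
    · rcases le_or_gt s a with hle | hlt
      · left; rw [List.foldl_cons, h]; omega
      · right; rw [List.foldl_cons, h]
        have hms : max a s = s := by omega
        rw [hms]; exact List.mem_cons_self ..
    · right; rw [List.foldl_cons]; right; exact h

lemma Dmax_ub {S : List (Nat × Nat)} {n m : Nat} {p : Nat × Nat} (h : p ∈ coords n m) :
    mdist S p ≤ Dmax S n m :=
  foldl_max_le_mem _ _ (List.mem_map.2 ⟨p, h, rfl⟩)

lemma Dmax_nonneg (S : List (Nat × Nat)) (n m : Nat) : 0 ≤ Dmax S n m :=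
  le_foldl_max_init _ _

lemma Dmax_attained {S : List (Nat × Nat)} {n m : Nat} (hS : S ≠ [])
    (hSin : ∀ s ∈ S, s.1 < n ∧ s.2 < m) :
    ∃ p : Nat × Nat, p.1 < n ∧ p.2 < m ∧ mdist S p = Dmax S n m := by
  rcases foldl_max_cases ((coords n m).map (mdist S)) 0 with h | h
  · -- foldl = 0: any source has distance 0
    obtain ⟨s, hs⟩ := List.exists_mem_of_ne_nil S hS
    obtain ⟨hs1, hs2⟩ := hSin s hs
    refine ⟨s, hs1, hs2, ?_⟩
    rw [Dmax, h]
    exact (mdist_zero_iff hS s).2 hs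
  · obtain ⟨p, hp, hh⟩ := List.mem_map.1 h
    obtain ⟨hp1, hp2⟩ := mem_coords.1 hp
    exact ⟨p, hp1, hp2, by rw [Dmax]; exact hh⟩

lemma Dmax_le {S : List (Nat × Nat)} {n m : Nat} (hS : S ≠ [])
    (hSin : ∀ s ∈ S, s.1 < n ∧ s.2 < m) (hn : 0 < n) (hm : 0 < m) :
    Dmax S n m ≤ ((n : Int) - 1) + ((m : Int) - 1) := by
  obtain ⟨p, hp1, hp2, hh⟩ := Dmax_attained hS hSin
  obtain ⟨s, hs⟩ := List.exists_mem_of_ne_nil S hS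
  obtain ⟨hs1, hs2⟩ := hSin s hs
  have h1 := mdist_le p hs
  simp only [manh] at h1
  omega

lemma nm_bound {n m : Nat} (hn : 0 < n) (hm : 0 < m) : n - 1 + (m - 1) ≤ n * m := by
  obtain ⟨a, rfl⟩ : ∃ a, n = a + 1 := ⟨n - 1, by omega⟩
  obtain ⟨b, rfl⟩ : ∃ b, m = b + 1 := ⟨m - 1, by omega⟩
  have h : (a + 1) * (b + 1) = a * b + a + b + 1 := by ring
  omega


-- ---- filter counting helpers ----
lemma bool_ext {a b : Bool} (h : a = true ↔ b = true) : a = b := by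
  cases a <;> cases b <;> simp_all

lemma filter_length_split (p q r : Nat × Nat → Bool) :
    ∀ (l : List (Nat × Nat)),
      (∀ x ∈ l, (r x = true ↔ (p x = true ∨ q x = true))) →
      (∀ x ∈ l, ¬(p x = true ∧ q x = true)) →
      (l.filter r).length = (l.filter p).length + (l.filter q).length := by
  intro l
  induction l with
  | nil => intro _ _; simp
  | cons a t ih =>
    intro h1 h2
    have ht := ih (fun x hx => h1 x (by simp [hx])) (fun x hx => h2 x (by simp [hx]))
    have ha1 := h1 a (by simp)
    have ha2 := h2 a (by simp)
    by_cases hp : p a = true <;> by_cases hq : q a = true <;>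
      simp_all [List.filter_cons] <;> omega

lemma filter_length_lt (p : Nat × Nat → Bool) (x : Nat × Nat) :
    ∀ (l : List (Nat × Nat)), x ∈ l → p x = false →
      (l.filter p).length < l.length := by
  intro l
  induction l with
  | nil => intro h _; simp at h
  | cons a t ih =>
    intro hx hpx
    rcases List.mem_cons.1 hx with rfl | hx
    · rw [List.filter_cons, hpx]
      simp only [List.length_cons]
      exact Nat.lt_succ_of_le (List.length_filter_le _ _)
    · by_cases hpa : p a = true
      · rw [List.filter_cons, hpa]
        simpa using ih hx hpx
      · rw [List.filter_cons, Bool.not_eq_true] at *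
        rw [hpa]
        simp only [List.length_cons]
        exact Nat.lt_succ_of_lt (ih hx hpx)

lemma filter_length_all (p : Nat × Nat → Bool) (l : List (Nat × Nat))
    (h : ∀ x ∈ l, p x = true) : (l.filter p).length = l.length := by
  rw [List.filter_eq_self.2 h]

-- ---- A's loop computes the largest distance ----
lemma loopA_md {n m : Nat} (hn : 0 < n) (hm : 0 < m) (S : List (Nat × Nat)) (hS : S ≠ [])
    (hSin : ∀ s ∈ S, s.1 < n ∧ s.2 < m) (D : Int)
    (hub : ∀ p : Nat × Nat, p.1 < n → p.2 < m → mdist S p ≤ D)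
    (hat : ∃ p : Nat × Nat, p.1 < n ∧ p.2 < m ∧ mdist S p = D) :
    ∀ (fuel : Nat) (g : List (List Int)) (k : Int), Rect g n m → 0 ≤ k → k ≤ D →
      D - k < (fuel : Int) →
      (∀ p : Nat × Nat, p.1 < n → p.2 < m →
        getC g p.1 p.2 = if mdist S p ≤ k then mdist S p + 1 else 0) →
      loopA fuel g (((coords n m).filter (fun p => decide (mdist S p ≤ k))).length : Int) k
        = D := by
  intro fuel
  induction fuel with
  | zero =>
    intro g k _ _ hkD hfuel _
    exfalso
    simp only [Nat.cast_zero] at hfuel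
    omega
  | succ f ih =>
    intro g k hrect hk0 hkD hfuel hinv
    have hlen : g.length = n := hrect.1
    have hhead : (g.headD []).length = m := by rw [headD_getD]; exact hrect.2 0 hn
    show (if _ < (g.length : Int) * ((g.headD []).length : Int) then _ else _) = D
    rw [hlen, hhead]
    by_cases hkD' : k < D
    · -- at least the farthest cell is still uninfected: the loop continues
      obtain ⟨pm, hpm1, hpm2, hpmd⟩ := hat
      have hcnt : (((coords n m).filter (fun p => decide (mdist S p ≤ k))).length : Int)
          < (n : Int) * (m : Int) := by
        have h1 := filter_length_lt (fun p => decide (mdist S p ≤ k)) pm (coords n m)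
          (mem_coords.2 ⟨hpm1, hpm2⟩) (by simp; omega)
        rw [length_coords] at h1
        push_cast
        exact_mod_cast h1
      rw [if_pos hcnt]
      have hsweep := sweep_eq (c := (((coords n m).filter
        (fun p => decide (mdist S p ≤ k))).length : Int)) hrect (by omega : 1 ≤ k + 1)
      rw [hsweep]
      -- the new layer is exactly the cells at distance k+1
      have hT : tgts g (k + 1) n m (coords n m)
          = (coords n m).filter (fun p => decide (mdist S p = k + 1)) := by
        apply List.filter_congr
        intro t ht
        obtain ⟨ht1, ht2⟩ := mem_coords.1 ht
        apply bool_ext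
        simp only [predT, Bool.and_eq_true, List.any_eq_true, beq_iff_eq,
          decide_eq_true_eq]
        constructor
        · rintro ⟨h0, p, hp, hpk, hadj⟩
          obtain ⟨hp1, hp2⟩ := mem_coords.1 hp
          have hip := hinv p hp1 hp2
          have hit := hinv t ht1 ht2
          have hmp : mdist S p = k := by
            by_cases hle : mdist S p ≤ k
            · rw [if_pos hle] at hip; omega
            · rw [if_neg hle] at hip; omega
          have hmt : ¬ mdist S t ≤ k := by
            intro hle
            rw [if_pos hle] at hit
            have := mdist_nonneg hS t
            omega
          have hlip := mdist_lip hS hadj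
          omega
        · intro hmt
          have hit := hinv t ht1 ht2
          obtain ⟨q, hq1, hq2, hadj, hqd⟩ :=
            mdist_descent hS hSin ht1 ht2 hk0 hmt
          refine ⟨?_, q, mem_coords.2 ⟨hq1, hq2⟩, ?_, hadj⟩
          · rw [if_neg (by omega)] at hit; exact hit
          · have hiq := hinv q hq1 hq2
            rw [if_pos (by omega)] at hiq
            omega
      have hTsub : ∀ a ∈ tgts g (k + 1) n m (coords n m), a.1 < n ∧ a.2 < m := tgts_sub
      -- count: |{d ≤ k}| + |{d = k+1}| = |{d ≤ k+1}|
      have hcount : (((coords n m).filter (fun p => decide (mdist S p ≤ k))).length : Int)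
            + ((tgts g (k + 1) n m (coords n m)).length : Int)
          = (((coords n m).filter (fun p => decide (mdist S p ≤ k + 1))).length : Int) := by
        rw [hT]
        have := filter_length_split (fun p => decide (mdist S p ≤ k))
          (fun p => decide (mdist S p = k + 1)) (fun p => decide (mdist S p ≤ k + 1))
          (coords n m) (fun x _ => by simp; omega) (fun x _ => by simp; omega)
        push_cast
        omega
      -- the new grid is the (k+1)-level grid
      have hinv' : ∀ p : Nat × Nat, p.1 < n → p.2 < m →
          getC (markCells g (k + 1) (tgts g (k + 1) n m (coords n m))) p.1 p.2
            = if mdist S p ≤ k + 1 then mdist S p + 1 else 0 := by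
        intro p hp1 hp2
        rw [getC_markCells (k + 1) _ g hrect hTsub p]
        by_cases hmem : p ∈ tgts g (k + 1) n m (coords n m)
        · have hd : mdist S p = k + 1 := by
            rw [hT] at hmem
            simpa using (List.mem_filter.1 hmem).2
          rw [if_pos hmem, if_pos (by omega), hd]
        · have hd : mdist S p ≠ k + 1 := by
            intro hcontra
            apply hmem
            rw [hT, List.mem_filter]
            exact ⟨mem_coords.2 ⟨hp1, hp2⟩, by simpa using hcontra⟩
          rw [if_neg hmem, hinv p hp1 hp2]
          by_cases hle : mdist S p ≤ k
          · rw [if_pos hle, if_pos (by omega)]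
          · rw [if_neg hle, if_neg (by omega)]
      have hrect' : Rect (markCells g (k + 1) (tgts g (k + 1) n m (coords n m))) n m :=
        markCells_rect (k + 1) _ g hrect
      have := ih (markCells g (k + 1) (tgts g (k + 1) n m (coords n m))) (k + 1)
        hrect' (by omega) (by omega) (by push_cast at hfuel ⊢; omega) hinv'
      rw [← hcount] at this
      exact this
    · -- k = D: every cell is infected, the loop stops and returns k = D
      have hk : k = D := by omega
      have hall : (((coords n m).filter (fun p => decide (mdist S p ≤ k))).length)
          = n * m := by
        rw [filter_length_all _ _ (fun x hx => by
          obtain ⟨h1, h2⟩ := mem_coords.1 hx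
          simp only [decide_eq_true_eq]
          rw [hk]
          exact hub x h1 h2), length_coords]
      rw [hall]
      rw [if_neg (by push_cast; omega)]
      exact hk


-- ---- B-side: the boolean seen-grid ----
lemma seenAt_markSeen (s : List (List Bool)) (x y x' y' : Nat) :
    seenAt (markSeen s x y) x' y' =
      if x = x' ∧ y = y' ∧ y < (s.getD x' []).length then true else seenAt s x' y' := by
  unfold seenAt markSeen
  simp only [List.getD_eq_getElem?_getD]
  rw [getElem?_modify_eq]
  by_cases hx : x = x'
  · subst hx
    cases hrow : s[x]? with
    | none => simp
    | some r =>
      simp only [ite_true, true_and, Option.map_some, Option.getD_some]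
      rw [List.getElem?_set]
      by_cases hy : y = y'
      · subst hy
        by_cases hlt : y < r.length
        · simp [hlt]
        · rw [if_pos rfl, if_neg hlt, List.getElem?_eq_none (by omega)]
          simp [hlt]
      · simp [hy]
  · simp [hx]

lemma length_markSeen (s : List (List Bool)) (x y : Nat) :
    (markSeen s x y).length = s.length := by simp [markSeen]

lemma rowLen_markSeen (s : List (List Bool)) (x y : Nat) (i : Nat) :
    ((markSeen s x y).getD i []).length = (s.getD i []).length := by
  unfold markSeen
  rw [List.getD_eq_getElem?_getD, List.getD_eq_getElem?_getD (l := s), getElem?_modify_eq]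
  cases hrow : s[i]? <;> split <;> simp_all

lemma markSeen_rectB {s : List (List Bool)} {n m : Nat} (h : RectB s n m) (x y : Nat) :
    RectB (markSeen s x y) n m :=
  ⟨by rw [length_markSeen, h.1], fun i hi => by rw [rowLen_markSeen]; exact h.2 i hi⟩

-- invariant carried through B's neighbour visits: relative to the seen-grid
-- `base` at the start of the layer, the accumulated list st.2 collects exactly
-- the fresh cells satisfying Φ, without duplicates, and st.1 = base + st.2
def VInv (base : List (List Bool)) (n m : Nat) (Φ : Nat × Nat → Prop)
    (st : List (List Bool) × List (Nat × Nat)) : Prop :=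
  RectB st.1 n m ∧ st.2.Nodup ∧
  (∀ t : Nat × Nat, t ∈ st.2 ↔
    t.1 < n ∧ t.2 < m ∧ seenAt base t.1 t.2 = false ∧ Φ t) ∧
  (∀ u v : Nat, u < n → v < m →
    seenAt st.1 u v = (seenAt base u v || decide ((u, v) ∈ st.2)))

lemma visit_inv {base : List (List Bool)} {n m : Nat} {Φ : Nat × Nat → Prop}
    {st : List (List Bool) × List (Nat × Nat)}
    (b : Prop) [Decidable b] (x y : Nat) (hb : b → x < n ∧ y < m)
    (h : VInv base n m Φ st) :
    VInv base n m (fun t => Φ t ∨ (b ∧ t = (x, y))) (visit b x y st) := by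
  obtain ⟨h1, h2, h3, h4⟩ := h
  unfold visit
  by_cases hc : b ∧ seenAt st.1 x y = false
  · obtain ⟨hbb, hseen⟩ := hc
    obtain ⟨hx, hy⟩ := hb hbb
    rw [if_pos ⟨hbb, hseen⟩]
    have hfresh : seenAt base x y = false ∧ (x, y) ∉ st.2 := by
      have hh := h4 x y hx hy
      rw [hseen] at hh
      constructor
      · cases hbase : seenAt base x y
        · rfl
        · rw [hbase] at hh; simp at hh
      · intro hmem
        rw [decide_eq_true hmem] at hh
        simp at hh
    refine ⟨markSeen_rectB h1 x y, ?_, ?_, ?_⟩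
    · rw [List.nodup_append]
      exact ⟨h2, List.nodup_singleton _, fun a ha c hc => by
        have : c = (x, y) := by simpa using hc
        subst this
        intro heq
        exact hfresh.2 (heq ▸ ha)⟩
    · intro t
      rw [List.mem_append, List.mem_singleton, h3 t]
      constructor
      · rintro (⟨ha, hb', hc', hd⟩ | rfl)
        · exact ⟨ha, hb', hc', Or.inl hd⟩
        · exact ⟨hx, hy, hfresh.1, Or.inr ⟨hbb, rfl⟩⟩
      · rintro ⟨ha, hb', hc', hd | ⟨-, rfl⟩⟩
        · exact Or.inl ⟨ha, hb', hc', hd⟩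
        · exact Or.inr rfl
    · intro u v hu hv
      rw [seenAt_markSeen]
      by_cases he : x = u ∧ y = v
      · obtain ⟨rfl, rfl⟩ := he
        rw [if_pos ⟨rfl, rfl, by rw [h1.2 x hu]; exact hv⟩]
        simp
      · rw [if_neg (by rintro ⟨rfl, rfl, -⟩; exact he ⟨rfl, rfl⟩), h4 u v hu hv]
        have : ((u, v) ∈ st.2 ++ [(x, y)]) ↔ ((u, v) ∈ st.2) := by
          rw [List.mem_append, List.mem_singleton]
          constructor
          · rintro (hh | hh)
            · exact hh
            · exact absurd (by simpa using hh : u = x ∧ v = y) (by tauto)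
          · exact Or.inl
        simp only [this]
  · rw [if_neg hc]
    refine ⟨h1, h2, ?_, h4⟩
    intro t
    rw [h3 t]
    constructor
    · rintro ⟨ha, hb', hc', hd⟩
      exact ⟨ha, hb', hc', Or.inl hd⟩
    · rintro ⟨ha, hb', hc', hd | ⟨hbb, rfl⟩⟩
      · exact ⟨ha, hb', hc', hd⟩
      · -- b holds but the cell was already seen in st.1, so it is in st.2
        have hst : seenAt st.1 x y ≠ false := fun hh => hc ⟨hbb, hh⟩
        have hh := h4 x y ha hb'
        rw [hc'] at hh
        by_cases hmem : (x, y) ∈ st.2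
        · exact (h3 (x, y)).1 hmem
        · exfalso
          exact hst (by rw [hh, decide_eq_false hmem]; rfl)

lemma expandCell_inv {base : List (List Bool)} {n m : Nat} {Φ : Nat × Nat → Prop}
    {st : List (List Bool) × List (Nat × Nat)} {p : Nat × Nat}
    (hp : p.1 < n ∧ p.2 < m) (h : VInv base n m Φ st) :
    VInv base n m (fun t => Φ t ∨ adjB p t = true) (expandCell n m st p) := by
  obtain ⟨hp1, hp2⟩ := hp
  unfold expandCell
  have h1 := visit_inv (0 < p.1 ∧ p.1 - 1 < n ∧ p.2 < m) (p.1 - 1) p.2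
    (fun hb => ⟨hb.2.1, hb.2.2⟩) h
  have h2 := visit_inv (p.1 + 1 < n ∧ p.2 < m) (p.1 + 1) p.2
    (fun hb => ⟨hb.1, hb.2⟩) h1
  have h3 := visit_inv (p.1 < n ∧ 0 < p.2) p.1 (p.2 - 1)
    (fun hb => ⟨hb.1, by omega⟩) h2
  have h4 := visit_inv (p.1 < n ∧ p.2 + 1 < m) p.1 (p.2 + 1)
    (fun hb => ⟨hb.1, hb.2⟩) h3
  -- rephrase the accumulated predicate as plain adjacency
  obtain ⟨g1, g2, g3, g4⟩ := h4
  refine ⟨g1, g2, ?_, g4⟩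
  intro t
  rw [g3 t]
  constructor
  · rintro ⟨ha, hb', hc', hd⟩
    refine ⟨ha, hb', hc', ?_⟩
    rcases hd with ((((hd | ⟨hcond, rfl⟩) | ⟨hcond, rfl⟩) | ⟨hcond, rfl⟩) | ⟨hcond, rfl⟩)
    · exact Or.inl hd
    · right; rw [adjB_iff]; left; exact ⟨by omega, rfl⟩
    · right; rw [adjB_iff]; right; left; exact ⟨rfl, rfl⟩
    · right; rw [adjB_iff]; right; right; left; exact ⟨by omega, rfl⟩
    · right; rw [adjB_iff]; right; right; right; exact ⟨rfl, rfl⟩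
  · rintro ⟨ha, hb', hc', hd | hadj⟩
    · exact ⟨ha, hb', hc', Or.inl (Or.inl (Or.inl (Or.inl hd)))⟩
    · refine ⟨ha, hb', hc', ?_⟩
      rcases (adjB_iff p t).1 hadj with ⟨e1, e2⟩ | ⟨e1, e2⟩ | ⟨e1, e2⟩ | ⟨e1, e2⟩
      · -- t = (p.1 - 1, p.2)
        left; left; left; right
        refine ⟨⟨by omega, by omega, by omega⟩, ?_⟩
        obtain ⟨t1, t2⟩ := t
        simp only [Prod.mk.injEq]
        constructor <;> omega
      · -- t = (p.1 + 1, p.2)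
        left; left; right
        refine ⟨⟨by omega, by omega⟩, ?_⟩
        obtain ⟨t1, t2⟩ := t
        simp only [Prod.mk.injEq]
        constructor <;> omega
      · -- t = (p.1, p.2 - 1)
        left; right
        refine ⟨⟨by omega, by omega⟩, ?_⟩
        obtain ⟨t1, t2⟩ := t
        simp only [Prod.mk.injEq]
        constructor <;> omega
      · -- t = (p.1, p.2 + 1)
        right
        refine ⟨⟨by omega, by omega⟩, ?_⟩
        obtain ⟨t1, t2⟩ := t
        simp only [Prod.mk.injEq]
        constructor <;> omega

lemma expand_fold_inv {base : List (List Bool)} {n m : Nat} :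
    ∀ (P : List (Nat × Nat)) (Φ : Nat × Nat → Prop)
      (st : List (List Bool) × List (Nat × Nat)),
      (∀ p ∈ P, p.1 < n ∧ p.2 < m) → VInv base n m Φ st →
      VInv base n m (fun t => Φ t ∨ ∃ p ∈ P, adjB p t = true)
        (P.foldl (expandCell n m) st) := by
  intro P
  induction P with
  | nil =>
    intro Φ st _ h
    obtain ⟨h1, h2, h3, h4⟩ := h
    simp only [List.foldl_nil]
    refine ⟨h1, h2, ?_, h4⟩
    intro t
    rw [h3 t]
    simp
  | cons p P ih =>
    intro Φ st hP h
    have h1 := expandCell_inv (hP p (by simp)) h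
    have h2 := ih _ _ (fun q hq => hP q (by simp [hq])) h1
    obtain ⟨g1, g2, g3, g4⟩ := h2
    simp only [List.foldl_cons]
    refine ⟨g1, g2, ?_, g4⟩
    intro t
    rw [g3 t]
    constructor
    · rintro ⟨ha, hb', hc', (hd | hadj) | ⟨q, hq, hadj⟩⟩
      · exact ⟨ha, hb', hc', Or.inl hd⟩
      · exact ⟨ha, hb', hc', Or.inr ⟨p, by simp, hadj⟩⟩
      · exact ⟨ha, hb', hc', Or.inr ⟨q, by simp [hq], hadj⟩⟩
    · rintro ⟨ha, hb', hc', hd | ⟨q, hq, hadj⟩⟩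
      · exact ⟨ha, hb', hc', Or.inl (Or.inl hd)⟩
      · rcases List.mem_cons.1 hq with rfl | hq
        · exact ⟨ha, hb', hc', Or.inl (Or.inr hadj)⟩
        · exact ⟨ha, hb', hc', Or.inr ⟨q, hq, hadj⟩⟩

-- ---- B's loop counts the layers up to the largest distance ----
lemma loopB_md {n m : Nat} (S : List (Nat × Nat)) (hS : S ≠ [])
    (hSin : ∀ s ∈ S, s.1 < n ∧ s.2 < m) (D : Int)
    (hub : ∀ p : Nat × Nat, p.1 < n → p.2 < m → mdist S p ≤ D)
    (hat : ∃ p : Nat × Nat, p.1 < n ∧ p.2 < m ∧ mdist S p = D) :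
    ∀ (fuel : Nat) (seen : List (List Bool)) (frontier : List (Nat × Nat)) (k : Int),
      RectB seen n m → 0 ≤ k → k ≤ D → D - k < (fuel : Int) →
      (∀ u v : Nat, u < n → v < m →
        seenAt seen u v = decide (mdist S (u, v) ≤ k)) →
      (∀ p : Nat × Nat, p ∈ frontier ↔ p.1 < n ∧ p.2 < m ∧ mdist S p = k) →
      loopB n m fuel seen frontier k = D := by
  intro fuel
  induction fuel with
  | zero =>
    intro seen frontier k _ _ hkD hfuel _ _
    exfalso
    simp only [Nat.cast_zero] at hfuel
    omega
  | succ f ih =>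
    intro seen frontier k hrect hk0 hkD hfuel hseen hfr
    have hbase : VInv seen n m (fun _ => False) (seen, ([] : List (Nat × Nat))) := by
      refine ⟨hrect, List.nodup_nil, ?_, ?_⟩
      · intro t; simp
      · intro u v hu hv; simp
    have hfold := expand_fold_inv frontier (fun _ => False) (seen, [])
      (fun p hp => ⟨(hfr p).1 hp |>.1, ((hfr p).1 hp).2.1⟩) hbase
    obtain ⟨g1, g2, g3, g4⟩ := hfold
    set st := frontier.foldl (expandCell n m) (seen, ([] : List (Nat × Nat))) with hst
    -- the new layer is exactly the cells at distance k+1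
    have hmem : ∀ t : Nat × Nat, t ∈ st.2 ↔ t.1 < n ∧ t.2 < m ∧ mdist S t = k + 1 := by
      intro t
      rw [g3 t]
      constructor
      · rintro ⟨ha, hb', hc', hd⟩
        rcases hd with hd | ⟨p, hp, hadj⟩
        · exact absurd hd not_false
        · obtain ⟨hp1, hp2, hpd⟩ := (hfr p).1 hp
          have hlip := mdist_lip hS hadj
          have hnot : ¬ mdist S t ≤ k := by
            rw [hseen t.1 t.2 ha hb'] at hc'
            simpa using hc'
          exact ⟨ha, hb', by omega⟩
      · rintro ⟨ha, hb', hd⟩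
        obtain ⟨q, hq1, hq2, hadj, hqd⟩ := mdist_descent hS hSin ha hb' hk0 hd
        refine ⟨ha, hb', ?_, Or.inr ⟨q, (hfr q).2 ⟨hq1, hq2, hqd⟩, hadj⟩⟩
        rw [hseen t.1 t.2 ha hb']
        simp
        omega
    show (if st.2.isEmpty then k else loopB n m f st.1 st.2 (k + 1)) = D
    by_cases hkD' : k < D
    · -- a cell at distance k+1 exists, so the next frontier is nonempty
      have hex : ∃ t : Nat × Nat, t.1 < n ∧ t.2 < m ∧ mdist S t = k + 1 := by
        obtain ⟨pm, hpm1, hpm2, hpmd⟩ := hat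
        exact mdist_exists_eq hS hSin (mdist S pm - (k + 1)).toNat pm hpm1 hpm2
          (k + 1) (by omega) (by omega) rfl
      obtain ⟨t, ht1, ht2, htd⟩ := hex
      have hne : st.2 ≠ [] := by
        intro hnil
        have := (hmem t).2 ⟨ht1, ht2, htd⟩
        rw [hnil] at this
        simp at this
      rw [if_neg (by simpa [List.isEmpty_iff] using hne)]
      apply ih st.1 st.2 (k + 1) g1 (by omega) (by omega)
        (by push_cast at hfuel ⊢; omega)
      · intro u v hu hv
        rw [g4 u v hu hv, hseen u v hu hv]
        have hmem' := hmem (u, v)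
        by_cases hle : mdist S (u, v) ≤ k
        · rw [decide_eq_true hle]
          simp
          omega
        · rw [decide_eq_false hle]
          by_cases heq : mdist S (u, v) = k + 1
          · rw [decide_eq_true (by omega : mdist S (u, v) ≤ k + 1)]
            simp
            exact (hmem').2 ⟨hu, hv, heq⟩
          · rw [decide_eq_false (by omega : ¬ mdist S (u, v) ≤ k + 1)]
            simp
            intro hmm
            exact absurd ((hmem').1 hmm).2.2 heq
      · intro p
        rw [hmem p]
    · -- k = D: no cell at distance k+1 remains, the loop stops
      have hk : k = D := by omega
      have hnil : st.2 = [] := by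
        rw [List.eq_nil_iff_forall_not_mem]
        intro t ht
        obtain ⟨ht1, ht2, htd⟩ := (hmem t).1 ht
        have := hub t ht1 ht2
        omega
      rw [if_pos (by simp [hnil])]
      exact hk


-- ---- initial-state bridges ----
lemma map_getD_range {α : Type} (l : List α) (d : α) :
    (List.range l.length).map (fun i => l.getD i d) = l := by
  apply List.ext_getElem
  · simp
  · intro i h1 h2
    simp [List.getD_eq_getElem?_getD, List.getElem?_eq_getElem h2]

lemma getD_mem {α : Type} (l : List α) (d : α) (i : Nat) (h : i < l.length) :
    l.getD i d ∈ l := by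
  rw [List.getD_eq_getElem?_getD, List.getElem?_eq_getElem h, Option.getD_some]
  exact List.getElem_mem h

lemma row_count (row : List Int) (h01 : ∀ v ∈ row, v = 0 ∨ v = 1) :
    (List.range row.length).countP (fun y => row.getD y 0 != 0) = row.count 1 := by
  have h1 : row.count 1 = row.countP (fun v => v == 1) := rfl
  rw [h1]
  conv_rhs => rw [← map_getD_range row 0]
  rw [List.countP_map]
  apply List.countP_congr
  intro y hy
  have hmem : row.getD y 0 ∈ row := getD_mem row 0 y (List.mem_range.1 hy)
  simp only [Function.comp_def]
  rcases h01 _ hmem with h | h <;> rw [h] <;> decide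

lemma grid_count (g : List (List Int)) (n m : Nat) (hrect : Rect g n m)
    (h01 : ∀ row ∈ g, ∀ v ∈ row, v = 0 ∨ v = 1) :
    ((coords n m).filter (fun p => getC g p.1 p.2 != 0)).length
      = (g.map (List.count 1)).sum := by
  rw [← List.countP_eq_length_filter]
  unfold coords
  rw [List.countP_flatMap]
  have hx : ∀ x ∈ List.range n,
      (((List.range m).map (fun y => (x, y))).countP (fun p => getC g p.1 p.2 != 0))
        = (g.getD x []).count 1 := by
    intro x hxn
    rw [List.countP_map]
    have hrow : (g.getD x []).length = m := hrect.2 x (List.mem_range.1 hxn)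
    have hmem : g.getD x [] ∈ g := getD_mem g [] x (by rw [hrect.1]; exact List.mem_range.1 hxn)
    have := row_count (g.getD x []) (h01 _ hmem)
    rw [hrow] at this
    exact this
  simp only [Function.comp_def]
  rw [List.map_congr_left hx]
  have : (List.range n).map (fun x => (g.getD x []).count 1)
      = g.map (List.count 1) := by
    conv_rhs => rw [← map_getD_range g []]
    rw [List.map_map, ← hrect.1]
    rfl
  rw [this]

lemma rectB_init (g : List (List Int)) (n m : Nat) (hrect : Rect g n m) :
    RectB (g.map (fun row => row.map (fun c => c != 0))) n m := by
  constructor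
  · simp [hrect.1]
  · intro i hi
    have hi' : i < g.length := by rw [hrect.1]; exact hi
    have h2 := hrect.2 i hi
    rw [List.getD_eq_getElem?_getD, List.getElem?_eq_getElem hi', Option.getD_some] at h2
    rw [List.getD_eq_getElem?_getD, List.getElem?_map, List.getElem?_eq_getElem hi']
    simpa using h2

lemma seenAt_init (g : List (List Int)) {n m : Nat} (hrect : Rect g n m)
    (x y : Nat) (hx : x < n) (hy : y < m) :
    seenAt (g.map (fun row => row.map (fun c => c != 0))) x y = (getC g x y != 0) := by
  have hx' : x < g.length := by rw [hrect.1]; exact hx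
  have hylen : y < g[x].length := by
    have h2 := hrect.2 x hx
    rw [List.getD_eq_getElem?_getD, List.getElem?_eq_getElem hx', Option.getD_some] at h2
    omega
  have hrowB : (g.map (fun row => row.map (fun c => c != 0))).getD x []
      = (g[x]).map (fun c => c != 0) := by
    rw [List.getD_eq_getElem?_getD, List.getElem?_map, List.getElem?_eq_getElem hx']
    rfl
  have hrowA : g.getD x [] = g[x] := by
    rw [List.getD_eq_getElem?_getD, List.getElem?_eq_getElem hx']
    rfl
  unfold seenAt getC
  rw [hrowB, hrowA]
  rw [List.getD_eq_getElem?_getD, List.getElem?_map, List.getElem?_eq_getElem hylen,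
    List.getD_eq_getElem?_getD, List.getElem?_eq_getElem hylen]
  simp

lemma loopA_succ (f : Nat) (g : List (List Int)) (cnt steps : Int) :
    loopA (f + 1) g cnt steps =
      if cnt < (g.length : Int) * ((g.headD []).length : Int) then
        let s := (coords g.length (g.headD []).length).foldl
          (stepCell g.length (g.headD []).length (steps + 1)) (g, cnt)
        loopA f s.1 s.2 (steps + 1)
      else steps := rfl

-- ===== VERDICT (by name: the statement is the Claim_ definition above) =====
theorem find_steps_count_spec : Claim_equal_find_steps_count := by
  intro field cnt _ hpre
  unfold Spec_find_steps_count
  obtain ⟨hne, hcase⟩ := hpre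
  have hn : 0 < field.length := by cases field <;> simp_all
  by_cases hc : cnt < (field.length : Int) * ((field.headD []).length : Int)
  · -- the loop runs: both sides are the largest distance to a source
    rcases hcase with h | ⟨hrows, h01, hcnt, hpos⟩
    · exact absurd hc (not_lt.2 h)
    have hrect : Rect field field.length (field.headD []).length := by
      refine ⟨rfl, ?_⟩
      intro i hi
      exact hrows _ (getD_mem field [] i hi)
    have hm : 0 < (field.headD []).length := by
      by_contra hm0
      have hm0' : (field.headD []).length = 0 := by omega
      have hsum : (field.map (List.count 1)).sum = 0 := by
        apply List.sum_eq_zero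
        intro x hx
        obtain ⟨row, hrow, rfl⟩ := List.mem_map.1 hx
        have hlen := hrows row hrow
        have hnil : row = [] := List.eq_nil_of_length_eq_zero (by omega)
        simp [hnil]
      omega
    have hSsub : ∀ s ∈ (coords field.length (field.headD []).length).filter
        (fun p => getC field p.1 p.2 != 0),
        s.1 < field.length ∧ s.2 < (field.headD []).length :=
      fun s hs => mem_coords.1 (List.mem_filter.1 hs).1
    have hmemS : ∀ p : Nat × Nat,
        p ∈ (coords field.length (field.headD []).length).filter
          (fun p => getC field p.1 p.2 != 0) ↔
        (p.1 < field.length ∧ p.2 < (field.headD []).length) ∧ getC field p.1 p.2 ≠ 0 := by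
      intro p
      rw [List.mem_filter, mem_coords]
      simp
    have hcount := grid_count field field.length (field.headD []).length hrect h01
    have hSne : (coords field.length (field.headD []).length).filter
        (fun p => getC field p.1 p.2 != 0) ≠ [] := by
      intro h
      rw [h] at hcount
      simp at hcount
      omega
    set S := (coords field.length (field.headD []).length).filter
      (fun p => getC field p.1 p.2 != 0) with hS_def
    have hget01 : ∀ p : Nat × Nat, p.1 < field.length → p.2 < (field.headD []).length →
        getC field p.1 p.2 = 0 ∨ getC field p.1 p.2 = 1 := by
      intro p h1 h2
      have hrow : field.getD p.1 [] ∈ field := getD_mem field [] p.1 h1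
      have hlen : (field.getD p.1 []).length = (field.headD []).length := hrect.2 p.1 h1
      have hv : (field.getD p.1 []).getD p.2 0 ∈ field.getD p.1 [] :=
        getD_mem _ 0 p.2 (by omega)
      exact h01 _ hrow _ hv
    have hmd0 : ∀ p : Nat × Nat, p.1 < field.length → p.2 < (field.headD []).length →
        (mdist S p = 0 ↔ getC field p.1 p.2 ≠ 0) := by
      intro p h1 h2
      rw [mdist_zero_iff hSne, hmemS]
      constructor
      · rintro ⟨-, h⟩; exact h
      · intro h; exact ⟨⟨h1, h2⟩, h⟩
    have hub : ∀ p : Nat × Nat, p.1 < field.length → p.2 < (field.headD []).length →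
        mdist S p ≤ Dmax S field.length (field.headD []).length :=
      fun p h1 h2 => Dmax_ub (mem_coords.2 ⟨h1, h2⟩)
    have hat := Dmax_attained hSne hSsub
    have hD0 := Dmax_nonneg S field.length (field.headD []).length
    have hDle := Dmax_le hSne hSsub hn hm
    have hfuel : Dmax S field.length (field.headD []).length - 0
        < ((field.length * (field.headD []).length + 1 : Nat) : Int) := by
      have h1 := nm_bound hn hm
      push_cast
      omega
    have hinv0 : ∀ p : Nat × Nat, p.1 < field.length → p.2 < (field.headD []).length →
        getC field p.1 p.2 = if mdist S p ≤ 0 then mdist S p + 1 else 0 := by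
      intro p h1 h2
      have hmd := hmd0 p h1 h2
      have hnn := mdist_nonneg hSne p
      rcases hget01 p h1 h2 with h0 | h1v
      · rw [h0, if_neg]
        intro hle
        exact (hmd.1 (by omega)) h0
      · have hz : mdist S p = 0 := hmd.2 (by rw [h1v]; exact one_ne_zero)
        rw [h1v, hz]
        norm_num
    have hfilter0 : (coords field.length (field.headD []).length).filter
        (fun p => decide (mdist S p ≤ 0)) = S := by
      conv_rhs => rw [hS_def]
      apply List.filter_congr
      intro t ht
      obtain ⟨h1, h2⟩ := mem_coords.1 ht
      apply bool_ext
      have hnn := mdist_nonneg hSne t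
      have hmd := hmd0 t h1 h2
      simp only [decide_eq_true_eq, bne_iff_ne, ne_eq]
      constructor
      · intro hle; exact hmd.1 (by omega)
      · intro hne0; rw [hmd.2 hne0]
    have hcntA : cnt = (((coords field.length (field.headD []).length).filter
        (fun p => decide (mdist S p ≤ 0))).length : Int) := by
      rw [hfilter0, hcnt, ← hcount]
    have hA : find_steps_count field cnt
        = Dmax S field.length (field.headD []).length := by
      unfold find_steps_count
      rw [hcntA]
      exact loopA_md hn hm S hSne hSsub _ hub hat
        (field.length * (field.headD []).length + 1) field 0 hrect le_rfl hD0 hfuel hinv0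
    have hB : find_steps_count_alt field cnt
        = Dmax S field.length (field.headD []).length := by
      unfold find_steps_count_alt
      rw [if_neg (not_le.2 hc)]
      rw [← hS_def]
      apply loopB_md S hSne hSsub _ hub hat
        (field.length * (field.headD []).length + 1) _ _ 0
        (rectB_init field _ _ hrect) le_rfl hD0 hfuel
      · intro u v hu hv
        rw [seenAt_init field hrect u v hu hv]
        apply bool_ext
        have hnn := mdist_nonneg hSne (u, v)
        have hmd := hmd0 (u, v) hu hv
        simp only [decide_eq_true_eq, bne_iff_ne, ne_eq]
        constructor
        · intro hne0; rw [(hmd.2 hne0 : mdist S (u, v) = 0)]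
        · intro hle; exact hmd.1 (by omega)
      · intro p
        rw [hmemS p]
        have hnn := mdist_nonneg hSne p
        constructor
        · rintro ⟨⟨h1, h2⟩, hne0⟩
          exact ⟨h1, h2, (hmd0 p h1 h2).2 hne0⟩
        · rintro ⟨h1, h2, h0⟩
          exact ⟨⟨h1, h2⟩, (hmd0 p h1 h2).1 h0⟩
    rw [hA, hB]
  · -- the count already covers the grid: both sides return 0 at once
    have hA : find_steps_count field cnt = 0 := by
      unfold find_steps_count
      rw [loopA_succ, if_neg hc]
    have hB : find_steps_count_alt field cnt = 0 := by
      unfold find_steps_count_alt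
      rw [if_pos (not_lt.1 hc)]
    rw [hA, hB]
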